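-- pv_equiv track=rewrite | github.com/Programator2/adventofcode | 2024/16a.py | dfs
-- ===== SOURCE A (Python) =====
-- from functools import reduce
--
-- def dfs(prev, elem: set):
--     if not elem:
--         return elem
--     return (
--         reduce(
--             lambda x, y: x | y, (dfs(prev, prev.get(e, set())) for e in elem)
--         )
--         | elem
--     )
-- ===== SOURCE B (Python) =====
-- def dfs(prev, elem: set):
--     # Reachability closure by depth-first traversal with a visited set:
--     # each node's children are expanded at most once after it is marked,
--     # instead of A's unmemoized exponential recursion.
--     out = []
--     out_set = set()
--
--     def visit(elems):
--         for e in elems: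
--             if e not in out_set:
--                 visit(prev.get(e, set()))
--         for e in elems:
--             if e not in out_set:
--                 out_set.add(e)
--                 out.append(e)
--
--     visit(elem)
--     return set(out)
-- ===== Notes on version B (the rewrite author's own statement) =====
-- stated objective: faster
-- what changed: A computes the reachability closure by unmemoized recursive set unions (re-expanding shared nodes exponentially often); B does one depth-first traversal that keeps a visited set and expands each node's children at most once after the node is recorded.
import Mathlib
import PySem

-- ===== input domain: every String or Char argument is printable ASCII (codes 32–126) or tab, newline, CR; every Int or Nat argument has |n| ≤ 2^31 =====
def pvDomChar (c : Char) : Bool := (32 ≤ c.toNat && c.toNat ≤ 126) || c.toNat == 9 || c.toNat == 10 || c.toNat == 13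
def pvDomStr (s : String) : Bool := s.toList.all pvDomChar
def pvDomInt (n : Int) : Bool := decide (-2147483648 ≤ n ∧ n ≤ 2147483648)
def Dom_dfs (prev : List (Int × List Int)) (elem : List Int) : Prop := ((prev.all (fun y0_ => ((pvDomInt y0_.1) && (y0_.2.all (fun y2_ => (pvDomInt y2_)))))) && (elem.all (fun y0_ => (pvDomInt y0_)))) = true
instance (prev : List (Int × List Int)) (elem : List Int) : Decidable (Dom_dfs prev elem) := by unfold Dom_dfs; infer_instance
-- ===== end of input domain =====

-- B replaces A's unmemoized exponential recursion by a depth-first traversal with a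
-- visited set (each node's children expanded at most once after the node is recorded).
-- Return-value equivalence only; neither program mutates its arguments.

-- prev.get(e, set()) — shared dictionary lookup of both Pythons
def pvChilds (prev : List (Int × List Int)) (e : Int) : List Int :=
  PySem.Dict.getD (PySem.Dict.mk prev) e []

-- ===== PORT A =====
-- Python A recurses without bound; the Nat argument is a fuel guard only: under
-- Pre_dfs (acyclic reachable subgraph) the fuel prev.length + 2 is never exhausted.
def dfsA (prev : List (Int × List Int)) : Nat → List Int → List Int
  | 0, elem => elem
  | f + 1, elem =>
    match elem with
    | [] => []                                   -- if not elem: return elem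
    | e :: rest =>                               -- reduce(|, (dfs(prev, prev.get(e, set())) for e in elem)) | elem
      PySem.Set.union
        (rest.foldl (fun x y => PySem.Set.union x (dfsA prev f (pvChilds prev y)))
          (dfsA prev f (pvChilds prev e)))
        (e :: rest)

def dfs (prev : List (Int × List Int)) (elem : List Int) : List Int :=
  dfsA prev (prev.length + 2) elem

-- ===== PORT B =====
-- literal port of Source B's visit: phase 1 recurses into unvisited nodes' children,
-- phase 2 appends the still-unvisited elements; same fuel guard as the A port.
def visitB (prev : List (Int × List Int)) : Nat → List Int → List Int → List Int
  | 0, _, out => out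
  | f + 1, elems, out =>
    let out1 := elems.foldl
      (fun o e => if PySem.Set.contains o e then o else visitB prev f (pvChilds prev e) o) out
    PySem.Set.update out1 elems

def dfs_alt (prev : List (Int × List Int)) (elem : List Int) : List Int :=
  visitB prev (prev.length + 2) elem []

-- ===== PRECONDITION & SPEC =====
def pvKeys (prev : List (Int × List Int)) : List Int := prev.map Prod.fst

-- Pre_ excludes exactly the inputs on which Python A recurses forever (RecursionError):
-- a cycle of prev's key→child edges reachable from elem.  Closed form: some set W of
-- keys covers elem's keys, is closed under the child relation, and induces an acyclic
-- subgraph (every nonempty subset of W has a vertex with no child in that subset).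
def Pre_dfs (prev : List (Int × List Int)) (elem : List Int) : Prop :=
  ∃ W ∈ (pvKeys prev).toFinset.powerset,
    (∀ e ∈ elem, e ∈ pvKeys prev → e ∈ W) ∧
    (∀ k ∈ W, ∀ v ∈ pvChilds prev k, v ∈ pvKeys prev → v ∈ W) ∧
    (∀ S ∈ W.powerset, S.Nonempty → ∃ k ∈ S, ∀ v ∈ pvChilds prev k, v ∉ S)
instance (prev : List (Int × List Int)) (elem : List Int) : Decidable (Pre_dfs prev elem) := by
  unfold Pre_dfs; infer_instance

def pvWitness_dfs : (List (Int × List Int)) × List Int := ([(1, [2, 3]), (2, [3])], [1, 4])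

def Spec_dfs (prev : List (Int × List Int)) (elem : List Int) (out : List Int) : Prop := out = dfs_alt prev elem
instance (prev : List (Int × List Int)) (elem : List Int) (out : List Int) : Decidable (Spec_dfs prev elem out) := by unfold Spec_dfs; infer_instance

-- ===== CLAIM (what is proved, stated in full; the proofs are below) =====
def Claim_equal_dfs : Prop := ∀ (prev : List (Int × List Int)) (elem : List Int), Dom_dfs prev elem → Pre_dfs prev elem → Spec_dfs prev elem (dfs prev elem)

-- ===== LEMMAS AND PROOFS =====

-- ---- generic PySem.Set utilities specific to these two programs' loops ----

theorem pv_add_mem_noop (o : List Int) (y : Int) (h : y ∈ o) : PySem.Set.add o y = o := by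
  simp [PySem.Set.add, PySem.Set.contains, h]

theorem pv_add_not_mem (o : List Int) (y : Int) (h : y ∉ o) : PySem.Set.add o y = o ++ [y] := by
  simp [PySem.Set.add, PySem.Set.contains, h]

theorem pv_upd_cons (acc : List Int) (y : Int) (ys : List Int) :
    PySem.Set.update acc (y :: ys) = PySem.Set.update (PySem.Set.add acc y) ys := rfl

theorem pv_upd_append (acc x y : List Int) :
    PySem.Set.update acc (x ++ y) = PySem.Set.update (PySem.Set.update acc x) y := by
  simp [PySem.Set.update, List.foldl_append]

theorem pv_upd_add (acc x : List Int) (y : Int) :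
    PySem.Set.update acc (PySem.Set.add x y) = PySem.Set.add (PySem.Set.update acc x) y := by
  by_cases hy : y ∈ x
  · rw [pv_add_mem_noop x y hy, pv_add_mem_noop]
    exact (PySem.Set.mem_update acc x y).2 (Or.inr hy)
  · rw [pv_add_not_mem x y hy, pv_upd_append]
    rfl

theorem pv_upd_upd (ys : List Int) : ∀ (x acc : List Int),
    PySem.Set.update acc (PySem.Set.update x ys) = PySem.Set.update (PySem.Set.update acc x) ys := by
  induction ys with
  | nil => intro x acc; rfl
  | cons y ys ih =>
    intro x acc
    rw [pv_upd_cons x y ys, ih (PySem.Set.add x y) acc, pv_upd_add, pv_upd_cons]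

theorem pv_upd_noop (o : List Int) (ys : List Int) (h : ∀ y ∈ ys, y ∈ o) :
    PySem.Set.update o ys = o := by
  induction ys generalizing o with
  | nil => rfl
  | cons y ys ih =>
    rw [pv_upd_cons, pv_add_mem_noop o y (h y (by simp))]
    exact ih o (fun z hz => h z (by simp [hz]))

theorem pv_upd_eq_append_of_nodup (s t : List Int) (h : (s ++ t).Nodup) :
    PySem.Set.update s t = s ++ t := by
  induction t generalizing s with
  | nil => simp
  | cons y ys ih =>
    have hy : y ∉ s := by
      intro hmem
      exact (List.disjoint_of_nodup_append h) hmem (by simp)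
    rw [pv_upd_cons, pv_add_not_mem s y hy, ih (s ++ [y]) (by simpa using h)]
    simp

theorem pv_mem_upd (acc xs : List Int) (y : Int) :
    y ∈ PySem.Set.update acc xs ↔ y ∈ acc ∨ y ∈ xs := PySem.Set.mem_update acc xs y

-- ---- A's fold shape ----

-- phase-1 view of A's body: pulling an accumulator through the reduce of unions
theorem pv_fold_pull (g : Int → List Int) (rest : List Int) : ∀ (i out : List Int),
    PySem.Set.update out (rest.foldl (fun x y => PySem.Set.union x (g y)) i) =
      rest.foldl (fun o y => PySem.Set.update o (g y)) (PySem.Set.update out i) := by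
  induction rest with
  | nil => intro i out; rfl
  | cons y rest ih =>
    intro i out
    show PySem.Set.update out (rest.foldl _ (PySem.Set.update i (g y))) = _
    rw [ih, pv_upd_upd]
    rfl

theorem pv_A_char (prev : List (Int × List Int)) (f : Nat) (elems out : List Int) :
    PySem.Set.update out (dfsA prev (f + 1) elems) =
      PySem.Set.update
        (elems.foldl (fun o e => PySem.Set.update o (dfsA prev f (pvChilds prev e))) out)
        elems := by
  cases elems with
  | nil => rfl
  | cons e rest =>
    show PySem.Set.update out (PySem.Set.update _ (e :: rest)) = _
    rw [pv_upd_upd, pv_fold_pull (fun y => dfsA prev f (pvChilds prev y)) rest]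
    rfl

theorem pv_foldA_mono (g : Int → List Int) (l : List Int) : ∀ (o : List Int) (x : Int),
    x ∈ o → x ∈ l.foldl (fun o e => PySem.Set.update o (g e)) o := by
  induction l with
  | nil => intro o x hx; exact hx
  | cons e l ih =>
    intro o x hx
    exact ih _ x ((pv_mem_upd o (g e) x).2 (Or.inl hx))

theorem pv_foldA_mem_of (g : Int → List Int) (l : List Int) : ∀ (o : List Int) (e : Int),
    e ∈ l → ∀ y ∈ g e, y ∈ l.foldl (fun o e => PySem.Set.update o (g e)) o := by
  induction l with
  | nil => intro o e he; cases he
  | cons e' l ih =>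
    intro o e he y hy
    rcases List.mem_cons.1 he with h | h
    · subst h
      exact pv_foldA_mono g l _ y ((pv_mem_upd o (g e) y).2 (Or.inr hy))
    · exact ih _ e h y hy

theorem pv_foldA_mem_inv (g : Int → List Int) (l : List Int) : ∀ (o : List Int) (y : Int),
    y ∈ l.foldl (fun o e => PySem.Set.update o (g e)) o → y ∈ o ∨ ∃ e ∈ l, y ∈ g e := by
  induction l with
  | nil => intro o y hy; exact Or.inl hy
  | cons e l ih =>
    intro o y hy
    rcases ih _ y hy with h | ⟨e', he', hy'⟩
    · rcases (pv_mem_upd o (g e) y).1 h with h' | h'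
      · exact Or.inl h'
      · exact Or.inr ⟨e, by simp, h'⟩
    · exact Or.inr ⟨e', by simp [he'], hy'⟩

-- ---- reachability (proof-side view of the prev graph) ----

def pvEdge (prev : List (Int × List Int)) (a b : Int) : Prop := b ∈ pvChilds prev a

def pvReaches (prev : List (Int × List Int)) : Int → Int → Prop :=
  Relation.ReflTransGen (pvEdge prev)

def pvRL (prev : List (Int × List Int)) (l : List Int) (y : Int) : Prop :=
  ∃ x ∈ l, pvReaches prev x y

theorem pv_RL_of_mem (prev : List (Int × List Int)) (l : List Int) (y : Int) (h : y ∈ l) :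
    pvRL prev l y := ⟨y, h, Relation.ReflTransGen.refl⟩

theorem pv_RL_head (prev : List (Int × List Int)) (l : List Int) (e y : Int) (he : e ∈ l)
    (h : pvRL prev (pvChilds prev e) y) : pvRL prev l y := by
  obtain ⟨c, hc, hr⟩ := h
  exact ⟨e, he, Relation.ReflTransGen.head hc hr⟩

-- every element A returns is reachable from the argument set
theorem pv_dfsA_sound (prev : List (Int × List Int)) : ∀ (f : Nat) (elems : List Int) (y : Int),
    y ∈ dfsA prev f elems → pvRL prev elems y := by
  intro f
  induction f with
  | zero => intro elems y hy; exact pv_RL_of_mem prev elems y hy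
  | succ f ih =>
    intro elems y hy
    cases elems with
    | nil => cases hy
    | cons e rest =>
      have hy' : y ∈ PySem.Set.update
          (rest.foldl (fun x z => PySem.Set.update x (dfsA prev f (pvChilds prev z)))
            (dfsA prev f (pvChilds prev e))) (e :: rest) := hy
      rcases (pv_mem_upd _ _ y).1 hy' with h | h
      · rcases pv_foldA_mem_inv (fun z => dfsA prev f (pvChilds prev z)) rest
            (dfsA prev f (pvChilds prev e)) y h with h' | ⟨z, hz, hmem⟩
        · exact pv_RL_head prev _ e y (by simp) (ih (pvChilds prev e) y h')
        · exact pv_RL_head prev _ z y (by simp [hz]) (ih (pvChilds prev z) y hmem)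
      · exact pv_RL_of_mem prev _ y h

-- ---- ranks via Kahn-style peeling of the witness set W (proof-side device) ----

def pvFirstFrom (p : Nat → Bool) (s : Nat) : Nat → Nat
  | 0 => s
  | fuel + 1 => if p s then s else pvFirstFrom p (s + 1) fuel

theorem pv_first_spec (p : Nat → Bool) : ∀ (fuel s : Nat),
    p (pvFirstFrom p s fuel) = true ∨ pvFirstFrom p s fuel = s + fuel := by
  intro fuel
  induction fuel with
  | zero => intro s; exact Or.inr rfl
  | succ fuel ih =>
    intro s
    by_cases h : p s
    · simp [pvFirstFrom, h]
    · rw [show pvFirstFrom p s (fuel + 1) = pvFirstFrom p (s + 1) fuel from by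
          simp [pvFirstFrom, h]]
      rcases ih (s + 1) with h' | h'
      · exact Or.inl h'
      · exact Or.inr (by omega)

theorem pv_first_min (p : Nat → Bool) : ∀ (fuel s j : Nat),
    s ≤ j → j < pvFirstFrom p s fuel → p j = false := by
  intro fuel
  induction fuel with
  | zero => intro s j h1 h2; simp [pvFirstFrom] at h2; omega
  | succ fuel ih =>
    intro s j h1 h2
    by_cases h : p s
    · simp [pvFirstFrom, h] at h2; omega
    · rw [show pvFirstFrom p s (fuel + 1) = pvFirstFrom p (s + 1) fuel from by
          simp [pvFirstFrom, h]] at h2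
      rcases Nat.eq_or_lt_of_le h1 with rfl | hlt
      · simpa using h
      · exact ih (s + 1) j hlt h2

-- one peeling round inside the witness set Wl
def pvSafeStep (prev : List (Int × List Int)) (Wl : List Int) (S : List Int) : List Int :=
  S ++ Wl.filter
    (fun k => !S.contains k &&
      (pvChilds prev k).all (fun v => !Wl.contains v || S.contains v))

def pvSafe (prev : List (Int × List Int)) (Wl : List Int) : Nat → List Int
  | 0 => []
  | i + 1 => pvSafeStep prev Wl (pvSafe prev Wl i)

def pvRank (prev : List (Int × List Int)) (Wl : List Int) (e : Int) : Nat :=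
  if e ∈ Wl then
    pvFirstFrom (fun i => (pvSafe prev Wl i).contains e) 0 (prev.length + 1)
  else 0

theorem pv_rank_le (prev : List (Int × List Int)) (Wl : List Int) (e : Int) (he : e ∈ Wl)
    (hs : e ∈ pvSafe prev Wl prev.length) : pvRank prev Wl e ≤ prev.length := by
  by_contra h
  have hmin := pv_first_min (fun i => (pvSafe prev Wl i).contains e) (prev.length + 1) 0
      prev.length (Nat.zero_le _) (by simpa [pvRank, he] using h)
  simp at hmin
  exact hmin hs

theorem pv_rank_mem (prev : List (Int × List Int)) (Wl : List Int) (e : Int) (he : e ∈ Wl)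
    (hs : e ∈ pvSafe prev Wl prev.length) : e ∈ pvSafe prev Wl (pvRank prev Wl e) := by
  have hle := pv_rank_le prev Wl e he hs
  rcases pv_first_spec (fun i => (pvSafe prev Wl i).contains e) (prev.length + 1) 0 with h | h
  · simpa [pvRank, he, List.contains_iff_mem] using
      (by simpa [pvRank, he] using h : (pvSafe prev Wl (pvRank prev Wl e)).contains e = true)
  · exfalso
    rw [pvRank, if_pos he] at hle
    omega

theorem pv_rank_pos (prev : List (Int × List Int)) (Wl : List Int) (e : Int) (he : e ∈ Wl)
    (hs : e ∈ pvSafe prev Wl prev.length) : 1 ≤ pvRank prev Wl e := by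
  by_contra h
  have h0 : pvRank prev Wl e = 0 := by omega
  have := pv_rank_mem prev Wl e he hs
  rw [h0] at this
  cases this

theorem pv_safe_sub (prev : List (Int × List Int)) (Wl : List Int) : ∀ i,
    ∀ v ∈ pvSafe prev Wl i, v ∈ Wl := by
  intro i
  induction i with
  | zero => intro v hv; cases hv
  | succ i ih =>
    intro v hv
    rcases List.mem_append.1 hv with h | h
    · exact ih v h
    · exact (List.mem_filter.1 h).1

theorem pv_rank_le_of_stage (prev : List (Int × List Int)) (Wl : List Int) (v : Int) (i : Nat)
    (hv : v ∈ pvSafe prev Wl i) : pvRank prev Wl v ≤ i := by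
  have hk : v ∈ Wl := pv_safe_sub prev Wl i v hv
  by_contra h
  have := pv_first_min (fun j => (pvSafe prev Wl j).contains v) (prev.length + 1) 0 i
      (Nat.zero_le _) (by simpa [pvRank, hk] using h)
  simp at this
  exact this hv

theorem pv_childs_of_not_key (prev : List (Int × List Int)) (e : Int)
    (h : e ∉ pvKeys prev) : pvChilds prev e = [] := by
  have : (prev.find? (fun p => p.1 == e)) = none := by
    rw [List.find?_eq_none]
    intro p hp hbeq
    exact h (List.mem_map.2 ⟨p, hp, beq_iff_eq.1 hbeq⟩)
  show ((prev.find? (fun p => p.1 == e)).map Prod.snd).getD [] = []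
  rw [this]
  rfl

theorem pv_edge_decrease (prev : List (Int × List Int)) (Wl : List Int) (e v : Int)
    (he : e ∈ Wl)
    (hsafe : e ∈ pvSafe prev Wl prev.length)
    (hv : v ∈ pvChilds prev e) : pvRank prev Wl v < pvRank prev Wl e := by
  have hpos := pv_rank_pos prev Wl e he hsafe
  have hmem := pv_rank_mem prev Wl e he hsafe
  obtain ⟨j, hj⟩ : ∃ j, pvRank prev Wl e = j + 1 := ⟨pvRank prev Wl e - 1, by omega⟩
  rw [hj] at hmem
  have hnot : e ∉ pvSafe prev Wl j := by
    intro hmem'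
    have := pv_rank_le_of_stage prev Wl e j hmem'
    omega
  have hfilter : e ∈ Wl.filter
      (fun k => !(pvSafe prev Wl j).contains k &&
        (pvChilds prev k).all (fun v => !Wl.contains v || (pvSafe prev Wl j).contains v)) := by
    rcases List.mem_append.1 hmem with h | h
    · exact absurd h hnot
    · exact h
  have hcond := (List.mem_filter.1 hfilter).2
  have hall := (Bool.and_elim_right hcond)
  have hv' := (List.all_eq_true.1 hall) v hv
  rw [hj]
  by_cases hvk : v ∈ Wl
  · have : (pvSafe prev Wl j).contains v = true := by
      rcases Bool.or_eq_true_iff.1 hv' with h | h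
      · rw [Bool.not_eq_eq_eq_not] at h
        simp [hvk] at h
      · exact h
    have := pv_rank_le_of_stage prev Wl v j (List.contains_iff_mem.1 this)
    omega
  · rw [pvRank, if_neg hvk]
    omega

-- peeling is complete on an acyclic witness set: every element of Wl is peeled
theorem pv_safe_mono (prev : List (Int × List Int)) (Wl : List Int) :
    ∀ i j, i ≤ j → ∀ v ∈ pvSafe prev Wl i, v ∈ pvSafe prev Wl j := by
  intro i j hij
  induction j with
  | zero => intro v hv; rw [Nat.le_zero.1 hij] at hv; exact hv
  | succ j ih =>
    intro v hv
    rcases Nat.eq_or_lt_of_le hij with rfl | hlt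
    · exact hv
    · exact List.mem_append.2 (Or.inl (ih (by omega) v hv))

theorem pv_peel_complete (prev : List (Int × List Int)) (Wl : List Int)
    (hsub : ∀ k ∈ Wl, k ∈ pvKeys prev)
    (hac : ∀ S : Finset Int, (∀ x ∈ S, x ∈ Wl) → S.Nonempty →
      ∃ k ∈ S, ∀ v ∈ pvChilds prev k, v ∉ S) :
    ∀ k ∈ Wl, k ∈ pvSafe prev Wl prev.length := by
  have card_bound : ∀ i : Nat,
      (Wl.toFinset \ (pvSafe prev Wl i).toFinset).card ≤ Wl.toFinset.card - i := by
    intro i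
    induction i with
    | zero => simp [Finset.card_le_card, Finset.sdiff_subset]
    | succ i ih =>
      set bad := Wl.toFinset \ (pvSafe prev Wl i).toFinset with hbad
      rcases Finset.eq_empty_or_nonempty bad with hempty | hne
      · have hsubset : Wl.toFinset \ (pvSafe prev Wl (i + 1)).toFinset ⊆ bad := by
          intro x hx
          rw [hbad]
          simp only [Finset.mem_sdiff, List.mem_toFinset] at hx ⊢
          exact ⟨hx.1, fun hmem => hx.2 (pv_safe_mono prev Wl i (i + 1) (by omega) x hmem)⟩
        have h0 : (Wl.toFinset \ (pvSafe prev Wl (i + 1)).toFinset).card = 0 :=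
          Finset.card_eq_zero.2 (Finset.subset_empty.1 (hempty ▸ hsubset))
        omega
      · obtain ⟨k, hk, hkv⟩ := hac bad
          (fun x hx => by
            rw [hbad] at hx
            exact List.mem_toFinset.1 (Finset.mem_sdiff.1 hx).1) hne
        have hkW : k ∈ Wl := by
          rw [hbad] at hk
          exact List.mem_toFinset.1 (Finset.mem_sdiff.1 hk).1
        have hknot : k ∉ pvSafe prev Wl i := by
          rw [hbad] at hk
          intro hmem
          exact (Finset.mem_sdiff.1 hk).2 (List.mem_toFinset.2 hmem)
        have hksafe : k ∈ pvSafe prev Wl (i + 1) := by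
          apply List.mem_append.2
          right
          apply List.mem_filter.2
          refine ⟨hkW, ?_⟩
          apply Bool.and_eq_true_iff.2
          constructor
          · simp [hknot]
          · apply List.all_eq_true.2
            intro v hv
            by_cases hvW : v ∈ Wl
            · have hvgood : v ∉ bad := hkv v hv
              rw [hbad] at hvgood
              simp only [Finset.mem_sdiff, List.mem_toFinset, not_and, not_not] at hvgood
              simp [hvgood hvW]
            · simp [hvW]
        have hstrict : (Wl.toFinset \ (pvSafe prev Wl (i + 1)).toFinset) ⊂ bad := by
          apply Finset.ssubset_iff_of_subset (by
            intro x hx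
            rw [hbad]
            simp only [Finset.mem_sdiff, List.mem_toFinset] at hx ⊢
            exact ⟨hx.1, fun hmem => hx.2 (pv_safe_mono prev Wl i (i + 1) (by omega) x hmem)⟩)
            |>.2 ⟨k, hk, by
              simp only [Finset.mem_sdiff, List.mem_toFinset, not_and, not_not]
              intro _
              exact hksafe⟩
        have hcard := Finset.card_lt_card hstrict
        omega
  intro k hk
  have hWle : Wl.toFinset.card ≤ prev.length := by
    calc Wl.toFinset.card ≤ (pvKeys prev).toFinset.card :=
          Finset.card_le_card (fun x hx => List.mem_toFinset.2 (hsub x (List.mem_toFinset.1 hx)))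
      _ ≤ (pvKeys prev).length := List.toFinset_card_le _
      _ = prev.length := List.length_map _
  have := card_bound prev.length
  have hempty : (Wl.toFinset \ (pvSafe prev Wl prev.length).toFinset) = ∅ := by
    apply Finset.card_eq_zero.1
    omega
  by_contra hnot
  have : k ∈ Wl.toFinset \ (pvSafe prev Wl prev.length).toFinset :=
    Finset.mem_sdiff.2 ⟨List.mem_toFinset.2 hk, fun h => hnot (List.mem_toFinset.1 h)⟩
  rw [hempty] at this
  cases this

-- ---- rank facts relative to Pre_ ----

theorem pv_RL_key_in_W (prev : List (Int × List Int)) (elem0 : List Int) (W : Finset Int)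
    (hcov : ∀ e ∈ elem0, e ∈ pvKeys prev → e ∈ W)
    (hclosed : ∀ k ∈ W, ∀ v ∈ pvChilds prev k, v ∈ pvKeys prev → v ∈ W)
    (e : Int) (hre : pvRL prev elem0 e) (hk : e ∈ pvKeys prev) : e ∈ W := by
  obtain ⟨x, hx, hr⟩ := hre
  have : ∀ y, pvReaches prev x y → y ∈ pvKeys prev → y ∈ W := by
    intro y hr'
    induction hr' with
    | refl => exact hcov x hx
    | tail hxb hbc ih =>
      intro hyk
      rename_i b c
      have hbc' : c ∈ pvChilds prev b := hbc
      have hbk : b ∈ pvKeys prev := by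
        by_contra h
        rw [pv_childs_of_not_key prev b h] at hbc'
        cases hbc'
      exact hclosed b (ih hbk) c hbc' hyk
  exact this e hr hk

theorem pv_RL_tail (prev : List (Int × List Int)) (elem0 : List Int) (e : Int)
    (hre : pvRL prev elem0 e) : ∀ c ∈ pvChilds prev e, pvRL prev elem0 c := by
  intro c hc
  obtain ⟨x, hx, hr⟩ := hre
  exact ⟨x, hx, Relation.ReflTransGen.tail hr hc⟩

-- ---- with enough fuel A reaches everything reachable, without duplicates ----

theorem pv_dfsA_complete (prev : List (Int × List Int)) (elem0 : List Int) (rk : Int → Nat)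
    (hdec : ∀ e v, pvRL prev elem0 e → v ∈ pvChilds prev e → rk v < rk e) :
    ∀ n f, n ≤ f → ∀ elems,
    (∀ e ∈ elems, pvRL prev elem0 e) → (∀ e ∈ elems, rk e < n) →
    ∀ y, pvRL prev elems y → y ∈ dfsA prev (f + 1) elems := by
  intro n
  induction n using Nat.strong_induction_on with
  | _ n ihn =>
  intro f hnf elems hR hn y hy
  obtain ⟨e, he, hr⟩ := hy
  cases elems with
  | nil => cases he
  | cons a rest =>
  show y ∈ PySem.Set.update
      (rest.foldl (fun x z => PySem.Set.update x (dfsA prev f (pvChilds prev z)))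
        (dfsA prev f (pvChilds prev a))) (a :: rest)
  rcases Relation.ReflTransGen.cases_head hr with rfl | ⟨c, hc, hcy⟩
  · exact (pv_mem_upd _ _ e).2 (Or.inr he)
  · have h1 : 1 ≤ n := by have := hn e he; omega
    cases f with
    | zero => omega
    | succ f' =>
      have hrk : rk e < n := hn e he
      have hyc : y ∈ dfsA prev (f' + 1) (pvChilds prev e) :=
        ihn (rk e) hrk f' (by omega) (pvChilds prev e)
          (pv_RL_tail prev elem0 e (hR e he))
          (fun v hv => hdec e v (hR e he) hv)
          y ⟨c, hc, hcy⟩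
      apply (pv_mem_upd _ _ y).2
      left
      rcases List.mem_cons.1 he with rfl | hrest
      · exact pv_foldA_mono _ rest _ y hyc
      · exact pv_foldA_mem_of _ rest _ e hrest y hyc

theorem pv_foldA_nodup (g : Int → List Int) (l : List Int) : ∀ (o : List Int),
    o.Nodup → (l.foldl (fun o e => PySem.Set.update o (g e)) o).Nodup := by
  induction l with
  | nil => intro o h; exact h
  | cons e l ih => intro o h; exact ih _ (PySem.Set.nodup_update _ _ h)

theorem pv_dfsA_nodup (prev : List (Int × List Int)) (elem0 : List Int) (rk : Int → Nat)
    (hdec : ∀ e v, pvRL prev elem0 e → v ∈ pvChilds prev e → rk v < rk e) :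
    ∀ n f, n ≤ f → ∀ elems,
    (∀ e ∈ elems, pvRL prev elem0 e) → (∀ e ∈ elems, rk e < n) →
    (dfsA prev (f + 1) elems).Nodup := by
  intro n
  induction n using Nat.strong_induction_on with
  | _ n ihn =>
  intro f hnf elems hR hn
  cases elems with
  | nil => exact List.nodup_nil
  | cons a rest =>
  show (PySem.Set.update
      (rest.foldl (fun x z => PySem.Set.update x (dfsA prev f (pvChilds prev z)))
        (dfsA prev f (pvChilds prev a))) (a :: rest)).Nodup
  apply PySem.Set.nodup_update
  apply pv_foldA_nodup
  have h1 : 1 ≤ n := by have := hn a (by simp); omega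
  cases f with
  | zero => omega
  | succ f' =>
    exact ihn (rk a) (hn a (by simp)) f' (by have := hn a (by simp); omega)
      (pvChilds prev a) (pv_RL_tail prev elem0 a (hR a (by simp)))
      (fun v hv => hdec a v (hR a (by simp)) hv)

-- ---- the main equivalence: B's pruned traversal = A's closure, accumulator form ----

def pvClosed (prev : List (Int × List Int)) (out : List Int) : Prop :=
  ∀ x ∈ out, ∀ y, pvRL prev (pvChilds prev x) y → y ∈ out

theorem pv_main (prev : List (Int × List Int)) (elem0 : List Int) (rk : Int → Nat)
    (hdec : ∀ e v, pvRL prev elem0 e → v ∈ pvChilds prev e → rk v < rk e) :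
    ∀ n f, n ≤ f → ∀ elems out,
    (∀ e ∈ elems, pvRL prev elem0 e) → (∀ e ∈ elems, rk e < n) →
    pvClosed prev out →
    visitB prev (f + 1) elems out = PySem.Set.update out (dfsA prev (f + 1) elems) ∧
      pvClosed prev (PySem.Set.update out (dfsA prev (f + 1) elems)) := by
  intro n
  induction n using Nat.strong_induction_on with
  | _ n ihn =>
  intro f hnf elems out hR hn hC
  have key : ∀ (l : List Int), (∀ e ∈ l, e ∈ elems) → ∀ o, pvClosed prev o →
      (l.foldl (fun o e => if PySem.Set.contains o e then o
          else visitB prev f (pvChilds prev e) o) o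
        = l.foldl (fun o e => PySem.Set.update o (dfsA prev f (pvChilds prev e))) o)
      ∧ pvClosed prev (l.foldl (fun o e => PySem.Set.update o (dfsA prev f (pvChilds prev e))) o)
      ∧ (∀ x ∈ l, ∀ y, pvRL prev (pvChilds prev x) y →
          y ∈ l.foldl (fun o e => PySem.Set.update o (dfsA prev f (pvChilds prev e))) o) := by
    intro l
    induction l with
    | nil => intro _ o hCo; exact ⟨rfl, hCo, by intro x hx; cases hx⟩
    | cons e l ihl =>
      intro hsub o hCo
      have hre : pvRL prev elem0 e := hR e (hsub e (by simp))
      have hrk : rk e < n := hn e (hsub e (by simp))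
      by_cases hmem : e ∈ o
      · have hBstep : (if PySem.Set.contains o e then o
            else visitB prev f (pvChilds prev e) o) = o := by
          simp [PySem.Set.contains, hmem]
        have hAstep : PySem.Set.update o (dfsA prev f (pvChilds prev e)) = o := by
          apply pv_upd_noop
          intro y hy
          exact hCo e hmem y (pv_dfsA_sound prev f (pvChilds prev e) y hy)
        obtain ⟨ih1, ih2, ih3⟩ := ihl (fun z hz => hsub z (by simp [hz])) o hCo
        refine ⟨?_, ?_, ?_⟩
        · show List.foldl _ (if PySem.Set.contains o e then o
            else visitB prev f (pvChilds prev e) o) l = _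
          rw [hBstep]
          show _ = List.foldl _ (PySem.Set.update o (dfsA prev f (pvChilds prev e))) l
          rw [hAstep]
          exact ih1
        · show pvClosed prev (List.foldl _ (PySem.Set.update o (dfsA prev f (pvChilds prev e))) l)
          rw [hAstep]; exact ih2
        · intro x hx y hy
          show y ∈ List.foldl _ (PySem.Set.update o (dfsA prev f (pvChilds prev e))) l
          rw [hAstep]
          rcases List.mem_cons.1 hx with rfl | hxl
          · exact pv_foldA_mono _ l o y (hCo x hmem y hy)
          · exact ih3 x hxl y hy
      · have h1 : 1 ≤ n := by omega
        cases f with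
        | zero => omega
        | succ f' =>
          have hsub' : ∀ c ∈ pvChilds prev e, pvRL prev elem0 c := pv_RL_tail prev elem0 e hre
          have hrk' : ∀ c ∈ pvChilds prev e, rk c < rk e :=
            fun c hc => hdec e c hre hc
          obtain ⟨hrec1, hrec2⟩ := ihn (rk e) hrk f' (by omega)
            (pvChilds prev e) o hsub' hrk' hCo
          have hBstep : (if PySem.Set.contains o e then o
              else visitB prev (f' + 1) (pvChilds prev e) o)
              = PySem.Set.update o (dfsA prev (f' + 1) (pvChilds prev e)) := by
            rw [if_neg (by simp [PySem.Set.contains, hmem]), hrec1]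
          obtain ⟨ih1, ih2, ih3⟩ := ihl (fun z hz => hsub z (by simp [hz]))
            (PySem.Set.update o (dfsA prev (f' + 1) (pvChilds prev e))) hrec2
          refine ⟨?_, ?_, ?_⟩
          · show List.foldl _ (if PySem.Set.contains o e then o
              else visitB prev (f' + 1) (pvChilds prev e) o) l = _
            rw [hBstep]
            exact ih1
          · exact ih2
          · intro x hx y hy
            rcases List.mem_cons.1 hx with rfl | hxl
            · have hyA : y ∈ dfsA prev (f' + 1) (pvChilds prev x) :=
                pv_dfsA_complete prev elem0 rk hdec (rk x) f' (by omega)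
                  (pvChilds prev x) hsub' hrk' y hy
              exact pv_foldA_mono _ l _ y ((pv_mem_upd _ _ y).2 (Or.inr hyA))
            · exact ih3 x hxl y hy
  obtain ⟨k1, k2, k3⟩ := key elems (fun _ h => h) out hC
  have hB : visitB prev (f + 1) elems out = PySem.Set.update
      (elems.foldl (fun o e => if PySem.Set.contains o e then o
        else visitB prev f (pvChilds prev e) o) out) elems := rfl
  constructor
  · rw [hB, k1, ← pv_A_char]
  · rw [pv_A_char]
    intro x hx y hy
    rcases (pv_mem_upd _ _ x).1 hx with h | h
    · exact (pv_mem_upd _ _ y).2 (Or.inl (k2 x h y hy))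
    · exact (pv_mem_upd _ _ y).2 (Or.inl (k3 x h y hy))

-- ===== VERDICT (by name: the statement is the Claim_ definition above) =====
theorem dfs_spec : Claim_equal_dfs := by
  unfold Claim_equal_dfs
  intro prev elem _ hPre
  unfold Spec_dfs dfs dfs_alt
  obtain ⟨W, hWpow, hcov, hclosed, hac⟩ := hPre
  have hWsub : ∀ k ∈ W.toList, k ∈ pvKeys prev := by
    intro k hk
    exact List.mem_toFinset.1 (Finset.mem_powerset.1 hWpow (Finset.mem_toList.1 hk))
  have hac' : ∀ S : Finset Int, (∀ x ∈ S, x ∈ W.toList) → S.Nonempty →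
      ∃ k ∈ S, ∀ v ∈ pvChilds prev k, v ∉ S := by
    intro S hS hne
    exact hac S (Finset.mem_powerset.2 (fun x hx => Finset.mem_toList.1 (hS x hx))) hne
  have hsafe : ∀ k ∈ W.toList, k ∈ pvSafe prev W.toList prev.length :=
    pv_peel_complete prev W.toList hWsub hac'
  set rk : Int → Nat := pvRank prev W.toList with hrk
  have hdec : ∀ e v, pvRL prev elem e → v ∈ pvChilds prev e → rk v < rk e := by
    intro e v hre hv
    have hek : e ∈ pvKeys prev := by
      by_contra h
      rw [pv_childs_of_not_key prev e h] at hv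
      cases hv
    have heW : e ∈ W.toList :=
      Finset.mem_toList.2 (pv_RL_key_in_W prev elem W hcov hclosed e hre hek)
    exact pv_edge_decrease prev W.toList e v heW (hsafe e heW) hv
  have hR : ∀ e ∈ elem, pvRL prev elem e := fun e he => pv_RL_of_mem prev elem e he
  have hn : ∀ e ∈ elem, rk e < prev.length + 1 := by
    intro e he
    by_cases heW : e ∈ W.toList
    · have := pv_rank_le prev W.toList e heW (hsafe e heW)
      rw [hrk]
      omega
    · rw [hrk, pvRank, if_neg heW]
      omega
  obtain ⟨h1, _⟩ := pv_main prev elem rk hdec (prev.length + 1) (prev.length + 1) le_rfl elem []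
    hR hn (by intro x hx; cases hx)
  rw [show prev.length + 2 = prev.length + 1 + 1 from rfl, h1]
  have hnodup : (dfsA prev (prev.length + 1 + 1) elem).Nodup :=
    pv_dfsA_nodup prev elem rk hdec (prev.length + 1) (prev.length + 1) le_rfl elem hR hn
  rw [show PySem.Set.update [] (dfsA prev (prev.length + 1 + 1) elem)
      = [] ++ dfsA prev (prev.length + 1 + 1) elem from
    pv_upd_eq_append_of_nodup [] _ (by simpa using hnodup)]
  rfl
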